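-- pv_equiv track=rewrite | github.com/cadumedeiros/sfm_model_analysis | load_data.py | _tokenize_keyword_block
-- ===== SOURCE A (Python) =====
-- def _tokenize_keyword_block(lines: list[str]) -> list[str]:
--     """Coleta tokens após uma keyword até o terminador '/'."""
--     tokens: list[str] = []
--     for line in lines:
--         s = line.strip()
--         if not s:
--             continue
--
--         # corta no terminador
--         if "/" in s:
--             s = s.split("/", 1)[0].strip()
--
--         if s:
--             tokens.extend(s.split())
--
--         if "/" in line:
--             break
--
--     return tokens
-- ===== SOURCE B (Python) =====
-- def _tokenize_keyword_block(lines: list[str]) -> list[str]: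
--     """Coleta tokens apos uma keyword ate o terminador '/'."""
--     text = "\n".join(lines)
--     i = text.find("/")
--     if i != -1:
--         text = text[:i]
--     return text.split()
-- ===== Notes on version B (the rewrite author's own statement) =====
-- stated objective: simpler
-- what changed: B has no per-line loop at all: it joins all lines into one newline-separated string, cuts that string at the first '/' with a single find, and tokenizes with one split(), whereas A scans line by line with strip/emptiness/cut/extend/break bookkeeping.
import Mathlib
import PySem

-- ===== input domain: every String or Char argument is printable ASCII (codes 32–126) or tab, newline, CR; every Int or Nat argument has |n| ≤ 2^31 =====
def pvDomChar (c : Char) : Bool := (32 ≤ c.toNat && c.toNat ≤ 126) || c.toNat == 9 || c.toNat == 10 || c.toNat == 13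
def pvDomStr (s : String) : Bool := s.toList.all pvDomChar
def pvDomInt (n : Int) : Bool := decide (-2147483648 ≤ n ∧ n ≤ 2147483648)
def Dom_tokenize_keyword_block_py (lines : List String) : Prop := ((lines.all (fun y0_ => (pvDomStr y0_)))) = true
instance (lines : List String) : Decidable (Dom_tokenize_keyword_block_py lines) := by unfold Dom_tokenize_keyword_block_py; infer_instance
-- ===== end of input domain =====

-- B is loop-free: it joins all lines with '\n', cuts the joined text at the first '/'
-- with one find, and tokenizes with one split() — simpler than A's per-line scan.

-- ===== PORT A =====
-- the for-loop with break, carrying the `tokens` accumulator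
def pvA_go : List String → List String → List String
  | [], tokens => tokens
  | line :: rest, tokens =>
    let s := PySem.Str.strip line
    if s = "" then pvA_go rest tokens            -- if not s: continue
    else
      -- if "/" in s: s = s.split("/", 1)[0].strip()
      -- ([0] via headD: split("/",1) with the non-empty separator "/" always returns a non-empty list)
      let s2 := if PySem.Str.isIn "/" s
        then PySem.Str.strip (((PySem.Str.splitMax? s "/" 1).getD []).headD "")
        else s
      -- if s: tokens.extend(s.split())
      let tokens2 := if s2 = "" then tokens else tokens ++ PySem.Str.split₀ s2
      -- if "/" in line: break
      if PySem.Str.isIn "/" line then tokens2 else pvA_go rest tokens2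

def tokenize_keyword_block_py (lines : List String) : List String := pvA_go lines []

-- ===== PORT B =====
-- text = "\n".join(lines); i = text.find("/"); if i != -1: text = text[:i]; return text.split()
def tokenize_keyword_block_py_alt (lines : List String) : List String :=
  let text := PySem.Str.join "\n" lines
  let i := PySem.Str.find text "/"
  let text2 := if i ≠ -1 then PySem.Str.slice text none (some i) else text
  PySem.Str.split₀ text2

-- ===== PRECONDITION & SPEC =====
def Spec_tokenize_keyword_block_py (lines : List String) (out : List String) : Prop := out = tokenize_keyword_block_py_alt lines
instance (lines : List String) (out : List String) : Decidable (Spec_tokenize_keyword_block_py lines out) := by unfold Spec_tokenize_keyword_block_py; infer_instance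

-- ===== CLAIM (what is proved, stated in full; the proofs are below) =====
def Claim_equal_tokenize_keyword_block_py : Prop := ∀ (lines : List String), Dom_tokenize_keyword_block_py lines → Spec_tokenize_keyword_block_py lines (tokenize_keyword_block_py lines)

-- ===== LEMMAS AND PROOFS =====

-- proof-side description of the pre-terminator line content (char level)
def pvCollectC : List (List Char) → List (List Char)
  | [] => []
  | l :: rest =>
    if '/' ∈ l then [l.takeWhile (fun c => c != '/')] else l :: pvCollectC rest

theorem pvGo_acc (s : List Char) : ∀ (cur : List Char) (acc : List (List Char)),
    PySem.Chars.split₀.go s cur acc = acc.reverse ++ PySem.Chars.split₀.go s cur [] := by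
  induction s with
  | nil => intro cur acc; simp [PySem.Chars.split₀.go]; split <;> simp
  | cons c s ih =>
    intro cur acc
    simp only [PySem.Chars.split₀.go]
    split
    · split
      · exact ih [] acc
      · rw [ih [] (_ :: acc), ih [] [_]]; simp
    · exact ih _ acc

theorem pvGo_ws_all (w : List Char) (hw : ∀ c ∈ w, PySem.Chars.isspace c = true) :
    ∀ cur acc, PySem.Chars.split₀.go w cur acc = PySem.Chars.split₀.go [] cur acc := by
  induction w with
  | nil => intro cur acc; rfl
  | cons c w ih =>
    intro cur acc
    simp only [PySem.Chars.split₀.go]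
    rw [if_pos (hw c (by simp))]
    have ih' := ih (fun c hc => hw c (by simp [hc]))
    split
    · rw [ih' [] acc]; simp_all [PySem.Chars.split₀.go]
    · rw [ih' [] _]; simp_all [PySem.Chars.split₀.go]

theorem pvGo_append_ws (s w : List Char) (hw : ∀ c ∈ w, PySem.Chars.isspace c = true) :
    ∀ cur acc, PySem.Chars.split₀.go (s ++ w) cur acc = PySem.Chars.split₀.go s cur acc := by
  induction s with
  | nil => intro cur acc; exact pvGo_ws_all w hw cur acc
  | cons c s ih =>
    intro cur acc
    simp only [List.cons_append, PySem.Chars.split₀.go]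
    split
    · split <;> rw [ih]
    · rw [ih]

theorem pvGo_ws_front (w : List Char) (hw : ∀ c ∈ w, PySem.Chars.isspace c = true) :
    ∀ s acc, PySem.Chars.split₀.go (w ++ s) [] acc = PySem.Chars.split₀.go s [] acc := by
  induction w with
  | nil => intro s acc; rfl
  | cons c w ih =>
    intro s acc
    simp only [List.cons_append, PySem.Chars.split₀.go]
    rw [if_pos (hw c (by simp))]
    simp only [List.isEmpty_nil, if_pos]
    exact ih (fun c hc => hw c (by simp [hc])) s acc

theorem pvGo_sep {sep : Char} (hsep : PySem.Chars.isspace sep = true) (a : List Char) :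
    ∀ (b cur acc), PySem.Chars.split₀.go (a ++ sep :: b) cur acc
    = PySem.Chars.split₀.go a cur acc ++ PySem.Chars.split₀.go b [] [] := by
  induction a with
  | nil =>
    intro b cur acc
    simp only [List.nil_append, PySem.Chars.split₀.go]
    rw [if_pos hsep]
    split
    · rw [pvGo_acc]
    · rw [pvGo_acc]
  | cons c a ih =>
    intro b cur acc
    simp only [List.cons_append, PySem.Chars.split₀.go]
    split
    · split <;> rw [ih]
    · rw [ih]

theorem pvSplit₀_sep {sep : Char} (hsep : PySem.Chars.isspace sep = true) (a b : List Char) :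
    PySem.Chars.split₀ (a ++ sep :: b) = PySem.Chars.split₀ a ++ PySem.Chars.split₀ b := by
  simp [PySem.Chars.split₀, pvGo_sep hsep]

theorem pvSplit₀_join {sep : Char} (hsep : PySem.Chars.isspace sep = true)
    (parts : List (List Char)) :
    PySem.Chars.split₀ (PySem.Chars.join [sep] parts) = (parts.map PySem.Chars.split₀).flatten := by
  induction parts with
  | nil => rfl
  | cons p ps ih =>
    cases ps with
    | nil => simp [PySem.Chars.join, List.intercalate]
    | cons q r =>
      have : PySem.Chars.join [sep] (p :: q :: r) = p ++ sep :: PySem.Chars.join [sep] (q :: r) := by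
        simp [PySem.Chars.join, List.intercalate, List.intersperse]
      rw [this, pvSplit₀_sep hsep, ih]
      simp

theorem pvJoin_cons (p q : List Char) (r : List (List Char)) :
    PySem.Chars.join ['\n'] (p :: q :: r) = p ++ '\n' :: PySem.Chars.join ['\n'] (q :: r) := by
  simp [PySem.Chars.join, List.intercalate, List.intersperse]

theorem pvSplit₀_ws_left (w s : List Char) (hw : ∀ c ∈ w, PySem.Chars.isspace c = true) :
    PySem.Chars.split₀ (w ++ s) = PySem.Chars.split₀ s := by
  simp [PySem.Chars.split₀, pvGo_ws_front w hw]

theorem pvSplit₀_ws_right (s w : List Char) (hw : ∀ c ∈ w, PySem.Chars.isspace c = true) :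
    PySem.Chars.split₀ (s ++ w) = PySem.Chars.split₀ s := by
  simp [PySem.Chars.split₀, pvGo_append_ws s w hw]

theorem pvLstrip_decomp (s : List Char) :
    s = s.takeWhile PySem.Chars.isspace ++ PySem.Chars.lstrip s :=
  (List.takeWhile_append_dropWhile).symm

theorem pvRstrip_decomp (s : List Char) :
    PySem.Chars.lstrip s
      = PySem.Chars.strip s ++ (((PySem.Chars.lstrip s).reverse).takeWhile PySem.Chars.isspace).reverse := by
  unfold PySem.Chars.strip PySem.Chars.rstrip
  conv_lhs => rw [← List.reverse_reverse (PySem.Chars.lstrip s),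
    ← List.takeWhile_append_dropWhile (p := PySem.Chars.isspace) (l := (PySem.Chars.lstrip s).reverse)]
  rw [List.reverse_append]

theorem pvSplit₀_strip (s : List Char) :
    PySem.Chars.split₀ (PySem.Chars.strip s) = PySem.Chars.split₀ s := by
  conv_rhs => rw [pvLstrip_decomp s, pvRstrip_decomp s]
  rw [pvSplit₀_ws_left _ _ (fun c hc => List.mem_takeWhile_imp hc),
      pvSplit₀_ws_right _ _ (fun c hc => List.mem_takeWhile_imp (by simpa using hc))]

theorem pvMem_dropWhile {x : Char} {p : Char → Bool} (hx : p x = false) (l : List Char) :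
    x ∈ l.dropWhile p ↔ x ∈ l := by
  constructor
  · exact fun h => (List.dropWhile_sublist p).mem h
  · intro h
    induction l with
    | nil => simp at h
    | cons c t ih =>
      by_cases hc : p c = true
      · rw [List.dropWhile_cons_of_pos hc]
        rcases List.mem_cons.mp h with rfl | h'
        · rw [hx] at hc; cases hc
        · exact ih h'
      · rw [List.dropWhile_cons_of_neg hc]; exact h

theorem pvMem_strip (s : List Char) : '/' ∈ PySem.Chars.strip s ↔ '/' ∈ s := by
  unfold PySem.Chars.strip PySem.Chars.rstrip PySem.Chars.lstrip
  rw [List.mem_reverse, pvMem_dropWhile (by decide), List.mem_reverse,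
      pvMem_dropWhile (by decide)]

theorem pvGoMax0 (fuel : Nat) (l cur : List Char) (acc : List (List Char)) :
    PySem.Chars.splitOnMax.go ['/'] fuel 0 l cur acc = ((cur.reverse ++ l) :: acc).reverse := by
  cases fuel with
  | zero => rfl
  | succ f => cases l with
    | nil => simp [PySem.Chars.splitOnMax.go]
    | cons c r => simp [PySem.Chars.splitOnMax.go]

theorem pvGoMax1 (a : List Char) : ∀ (b : List Char) (fuel : Nat) (cur : List Char)
    (acc : List (List Char)), '/' ∉ a → a.length < fuel →
    PySem.Chars.splitOnMax.go ['/'] fuel 1 (a ++ '/' :: b) cur acc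
      = (b :: (cur.reverse ++ a) :: acc).reverse := by
  induction a with
  | nil =>
    intro b fuel cur acc _ hf
    cases fuel with
    | zero => omega
    | succ f =>
      simp only [List.nil_append, PySem.Chars.splitOnMax.go]
      rw [if_neg (by omega), if_pos (by simp [List.isPrefixOf])]
      simp [pvGoMax0]
  | cons c a ih =>
    intro b fuel cur acc hna hf
    cases fuel with
    | zero => omega
    | succ f =>
      simp only [List.cons_append, PySem.Chars.splitOnMax.go]
      rw [if_neg (by omega), if_neg (by
        simp [List.isPrefixOf]
        intro hc; exact absurd hc.symm (fun h => hna (by simp [h])))]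
      rw [ih b f (c :: cur) acc (fun h => hna (by simp [h])) (by simpa using hf)]
      simp

theorem pvSplitAt (s : List Char) (h : '/' ∈ s) :
    s = s.takeWhile (fun c => c != '/') ++ '/' :: (s.dropWhile (fun c => c != '/')).tail := by
  induction s with
  | nil => cases h
  | cons c t ih =>
    by_cases hc : c = '/'
    · subst hc; simp
    · have hc' : (c != '/') = true := by simp [hc]
      have ht : '/' ∈ t := by rcases List.mem_cons.mp h with rfl | h' <;> [exact absurd rfl hc; exact h']
      simp only [List.takeWhile_cons, List.dropWhile_cons, hc', if_pos]
      rw [List.cons_append]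
      exact congrArg (c :: ·) (ih ht)

theorem pvNotMem_takeWhile (s : List Char) : '/' ∉ s.takeWhile (fun c => c != '/') := by
  intro hm; have := List.mem_takeWhile_imp hm; simp at this

theorem pvSplitOnMax_eq (s : List Char) (h : '/' ∈ s) :
    PySem.Chars.splitOnMax s ['/'] 1
      = [s.takeWhile (fun c => c != '/'), (s.dropWhile (fun c => c != '/')).tail] := by
  have hs := pvSplitAt s h
  have hna := pvNotMem_takeWhile s
  unfold PySem.Chars.splitOnMax
  rw [if_neg (by omega)]
  conv_lhs => rw [hs]
  rw [show (1 : Int).toNat = 1 from rfl]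
  rw [pvGoMax1 _ _ _ _ _ hna (by simp)]
  simp

theorem pvFind_eq (s : List Char) (h : '/' ∈ s) :
    PySem.Chars.find s ['/'] = ((s.takeWhile (fun c => c != '/')).length : Int) := by
  have hin : ['/'] <:+: s := (List.singleton_infix_iff '/' s).mpr h
  have hge : 0 ≤ PySem.Chars.find s ['/'] := (PySem.Chars.find_nonneg_iff s ['/']).mpr hin
  obtain ⟨hpre, hmin⟩ := PySem.Chars.find_spec (s := s) (sub := ['/']) hge
  set k := (PySem.Chars.find s ['/']).toNat with hk
  have hs := pvSplitAt s h
  have hna := pvNotMem_takeWhile s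
  set a := s.takeWhile (fun c => c != '/')
  have hkla : ¬ k < a.length := by
    intro hlt
    obtain ⟨t, ht⟩ := hpre
    have hg : s[k]? = some '/' := by
      rw [← List.head?_drop, ← ht]; rfl
    have : a[k]? = some '/' := by
      rw [hs] at hg
      rwa [List.getElem?_append_left hlt] at hg
    exact hna (List.mem_of_getElem? this)
  have hkge : ¬ a.length < k := by
    intro hlt
    apply hmin a.length hlt
    rw [hs, List.drop_left]
    exact ⟨_, rfl⟩
  omega

theorem pvTakeWhile_append_all {p : Char → Bool} (w r : List Char) (hw : ∀ c ∈ w, p c = true) :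
    (w ++ r).takeWhile p = w ++ r.takeWhile p := by
  induction w with
  | nil => rfl
  | cons c t ih =>
    simp only [List.cons_append, List.takeWhile_cons, hw c (by simp), if_pos]
    rw [ih (fun c hc => hw c (by simp [hc]))]

theorem pvTakeWhile_append_mem {p : Char → Bool} (x y : List Char) {c : Char} (hc : c ∈ x)
    (hp : p c = false) : (x ++ y).takeWhile p = x.takeWhile p := by
  induction x with
  | nil => cases hc
  | cons d t ih =>
    by_cases hd : p d = true
    · have hct : c ∈ t := by
        rcases List.mem_cons.mp hc with rfl | h'
        · rw [hp] at hd; cases hd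
        · exact h'
      simp only [List.cons_append, List.takeWhile_cons, hd, if_pos]
      rw [ih hct]
    · simp only [List.cons_append, List.takeWhile_cons, eq_false_of_ne_true hd]
      simp

theorem pvWs_ne_slash {c : Char} (h : PySem.Chars.isspace c = true) : (c != '/') = true := by
  rcases eq_or_ne c '/' with rfl | hne
  · cases h
  · simp [hne]

theorem pvPre_strip (l : List Char) (h : '/' ∈ PySem.Chars.strip l) :
    PySem.Chars.split₀ (l.takeWhile (fun c => c != '/'))
      = PySem.Chars.split₀ ((PySem.Chars.strip l).takeWhile (fun c => c != '/')) := by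
  conv_lhs => rw [pvLstrip_decomp l]
  rw [pvTakeWhile_append_all _ _ (fun c hc => pvWs_ne_slash (List.mem_takeWhile_imp hc)),
      pvSplit₀_ws_left _ _ (fun c hc => List.mem_takeWhile_imp hc)]
  conv_lhs => rw [pvRstrip_decomp l]
  rw [pvTakeWhile_append_mem _ _ h (by simp)]

theorem pvIsIn_iff (x : String) : PySem.Str.isIn "/" x = true ↔ '/' ∈ x.toList := by
  rw [PySem.Str.isIn_eq]
  rw [show ("/" : String).toList = ['/'] from by simp]
  rw [PySem.Chars.isIn_iff_infix]
  exact List.singleton_infix_iff '/' x.toList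

theorem pvSplit₀_str (x : String) :
    PySem.Str.split₀ x = List.map String.ofList (PySem.Chars.split₀ x.toList) := rfl

theorem pvStr_split₀_strip (line : String) :
    PySem.Str.split₀ (PySem.Str.strip line) = PySem.Str.split₀ line := by
  rw [pvSplit₀_str, pvSplit₀_str, PySem.Str.toList_strip, pvSplit₀_strip]

theorem pvStr_split₀_ws (line : String) (h : PySem.Str.strip line = "") :
    PySem.Str.split₀ line = [] := by
  rw [← pvStr_split₀_strip, h]
  rfl

theorem pvLine_term (line : String) (h : '/' ∈ line.toList) :
    PySem.Str.split₀ (PySem.Str.strip (((PySem.Str.splitMax? (PySem.Str.strip line) "/" 1).getD []).headD ""))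
      = List.map String.ofList (PySem.Chars.split₀ (line.toList.takeWhile (fun c => c != '/'))) := by
  have hcore : '/' ∈ PySem.Chars.strip line.toList := (pvMem_strip line.toList).mpr h
  have hsm : PySem.Str.splitMax? (PySem.Str.strip line) "/" 1
      = some [String.ofList ((PySem.Chars.strip line.toList).takeWhile (fun c => c != '/')),
              String.ofList (((PySem.Chars.strip line.toList).dropWhile (fun c => c != '/')).tail)] := by
    unfold PySem.Str.splitMax? PySem.Chars.splitMax?
    rw [if_neg (by simp)]
    rw [show ("/" : String).toList = ['/'] from by simp, PySem.Str.toList_strip]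
    rw [pvSplitOnMax_eq _ hcore]
    rfl
  rw [hsm]
  simp only [Option.getD_some, List.headD_cons]
  rw [pvSplit₀_str, PySem.Str.toList_strip, String.toList_ofList, pvSplit₀_strip]
  exact congrArg (List.map String.ofList) (pvPre_strip line.toList hcore).symm

-- A's loop, characterised by the collected pre-terminator content
theorem pvMain (lines : List String) : ∀ tokens : List String,
    pvA_go lines tokens = tokens
      ++ ((pvCollectC (lines.map String.toList)).map
            (fun l => List.map String.ofList (PySem.Chars.split₀ l))).flatten := by
  induction lines with
  | nil => intro tokens; simp [pvA_go, pvCollectC]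
  | cons line rest ih =>
    intro tokens
    simp only [pvA_go, List.map_cons, pvCollectC]
    by_cases hws : PySem.Str.strip line = ""
    · have hnin : '/' ∉ line.toList := by
        intro hm
        have h1 : '/' ∈ PySem.Chars.strip line.toList := (pvMem_strip line.toList).mpr hm
        rw [← PySem.Str.toList_strip, hws] at h1
        cases h1
      rw [if_pos hws, if_neg hnin]
      simp only [List.map_cons, List.flatten_cons]
      rw [show List.map String.ofList (PySem.Chars.split₀ line.toList) = PySem.Str.split₀ line from rfl,
          pvStr_split₀_ws line hws]
      simp only [List.nil_append]
      exact ih tokens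
    · rw [if_neg hws]
      by_cases hin : '/' ∈ line.toList
      · have h1 : PySem.Str.isIn "/" line = true := (pvIsIn_iff line).mpr hin
        have h2 : PySem.Str.isIn "/" (PySem.Str.strip line) = true := by
          rw [pvIsIn_iff, PySem.Str.toList_strip]
          exact (pvMem_strip line.toList).mpr hin
        simp only [h1, h2, if_true, if_pos hin]
        have hterm := pvLine_term line hin
        simp only [List.map_cons, List.map_nil, List.flatten_cons, List.flatten_nil,
          List.append_nil]
        split
        · next hs2 =>
          rw [← hterm, hs2]
          simp [show PySem.Str.split₀ "" = [] from rfl]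
        · next hs2 => rw [← hterm]
      · have h1 : PySem.Str.isIn "/" line = false := by
          rw [← Bool.not_eq_true, pvIsIn_iff]; exact hin
        have h2 : PySem.Str.isIn "/" (PySem.Str.strip line) = false := by
          rw [← Bool.not_eq_true, pvIsIn_iff, PySem.Str.toList_strip]
          intro hm
          exact hin ((pvMem_strip line.toList).mp hm)
        simp only [h1, h2, if_false, Bool.false_eq_true, if_neg hin]
        rw [if_neg hws]
        rw [ih (tokens ++ PySem.Str.split₀ (PySem.Str.strip line))]
        simp only [List.map_cons, List.flatten_cons, pvStr_split₀_strip line]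
        rw [show PySem.Str.split₀ line = List.map String.ofList (PySem.Chars.split₀ line.toList) from rfl]
        simp [List.append_assoc]

theorem pvMem_join (parts : List (List Char)) :
    '/' ∈ PySem.Chars.join ['\n'] parts ↔ ∃ p ∈ parts, '/' ∈ p := by
  induction parts with
  | nil => simp [PySem.Chars.join, List.intercalate]
  | cons p ps ih =>
    cases ps with
    | nil => simp [PySem.Chars.join, List.intercalate]
    | cons q r =>
      rw [pvJoin_cons]
      constructor
      · intro hm
        rcases List.mem_append.mp hm with hp | hrest
        · exact ⟨p, by simp, hp⟩
        · rcases List.mem_cons.mp hrest with h0 | hj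
          · cases h0
          · obtain ⟨x, hx, hmx⟩ := ih.mp hj
            exact ⟨x, List.mem_cons.mpr (Or.inr hx), hmx⟩
      · rintro ⟨x, hx, hmx⟩
        rcases List.mem_cons.mp hx with rfl | hx'
        · exact List.mem_append.mpr (Or.inl hmx)
        · exact List.mem_append.mpr (Or.inr (List.mem_cons.mpr (Or.inr (ih.mpr ⟨x, hx', hmx⟩))))

theorem pvCollectC_ne_nil (parts : List (List Char)) (h : parts ≠ []) :
    pvCollectC parts ≠ [] := by
  cases parts with
  | nil => exact absurd rfl h
  | cons l rest =>
    simp only [pvCollectC]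
    split <;> simp

theorem pvNoSlash_collect (parts : List (List Char)) (h : ∀ p ∈ parts, '/' ∉ p) :
    pvCollectC parts = parts := by
  induction parts with
  | nil => rfl
  | cons l rest ih =>
    simp only [pvCollectC]
    rw [if_neg (h l (by simp))]
    rw [ih (fun p hp => h p (by simp [hp]))]

theorem pvCut_join (parts : List (List Char)) (h : '/' ∈ PySem.Chars.join ['\n'] parts) :
    (PySem.Chars.join ['\n'] parts).takeWhile (fun c => c != '/')
      = PySem.Chars.join ['\n'] (pvCollectC parts) := by
  induction parts with
  | nil => simp [PySem.Chars.join, List.intercalate] at h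
  | cons l rest ih =>
    cases rest with
    | nil =>
      have hl : '/' ∈ l := by simpa [PySem.Chars.join, List.intercalate] using h
      simp only [pvCollectC, if_pos hl]
      simp [PySem.Chars.join, List.intercalate]
    | cons q r =>
      rw [pvJoin_cons] at h ⊢
      by_cases hl : '/' ∈ l
      · rw [pvTakeWhile_append_mem _ _ hl (by simp)]
        simp only [pvCollectC, if_pos hl]
        simp [PySem.Chars.join, List.intercalate]
      · have hrest : '/' ∈ PySem.Chars.join ['\n'] (q :: r) := by
          rcases List.mem_append.mp h with h1 | h2
          · exact absurd h1 hl
          · rcases List.mem_cons.mp h2 with h0 | hj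
            · cases h0
            · exact hj
        rw [pvTakeWhile_append_all _ _ (fun c hc => by
              rcases eq_or_ne c '/' with rfl | hne
              · exact absurd hc hl
              · simp [hne])]
        rw [List.takeWhile_cons_of_pos (by decide)]
        rw [ih hrest]
        obtain ⟨x, xs, hcc⟩ : ∃ x xs, pvCollectC (q :: r) = x :: xs := by
          cases hcase : pvCollectC (q :: r) with
          | nil => exact absurd hcase (pvCollectC_ne_nil _ (by simp))
          | cons x xs => exact ⟨x, xs, rfl⟩
        conv_rhs => rw [pvCollectC]
        rw [if_neg hl, hcc, pvJoin_cons]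

-- B's result, characterised by the same collected content
theorem pvBmain (lines : List String) :
    tokenize_keyword_block_py_alt lines
      = ((pvCollectC (lines.map String.toList)).map
            (fun l => List.map String.ofList (PySem.Chars.split₀ l))).flatten := by
  have hjl : (PySem.Str.join "\n" lines).toList
      = PySem.Chars.join ['\n'] (lines.map String.toList) := by
    rw [PySem.Str.toList_join]; simp
  have hfind : PySem.Str.find (PySem.Str.join "\n" lines) "/"
      = PySem.Chars.find ((PySem.Str.join "\n" lines).toList) ['/'] := by
    rw [PySem.Str.find_eq]; simp
  simp only [tokenize_keyword_block_py_alt]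
  by_cases h : '/' ∈ PySem.Chars.join ['\n'] (lines.map String.toList)
  · have hf : PySem.Str.find (PySem.Str.join "\n" lines) "/"
        = (((PySem.Chars.join ['\n'] (lines.map String.toList)).takeWhile (fun c => c != '/')).length : Int) := by
      rw [hfind, hjl, pvFind_eq _ h]
    rw [if_pos (by rw [hf]; omega)]
    rw [pvSplit₀_str, PySem.Str.toList_slice, hjl, hf,
        PySem.Chars.slice_eq_listSlice, PySem.List.slice_to _ (by positivity)]
    rw [show ((((PySem.Chars.join ['\n'] (lines.map String.toList)).takeWhile (fun c => c != '/')).length : Int)).toNat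
          = ((PySem.Chars.join ['\n'] (lines.map String.toList)).takeWhile (fun c => c != '/')).length from by omega]
    rw [← List.prefix_iff_eq_take.mp (List.takeWhile_prefix _)]
    rw [pvCut_join _ h, pvSplit₀_join (by decide)]
    simp [List.map_flatten, List.map_map, Function.comp_def]
  · have hf : PySem.Str.find (PySem.Str.join "\n" lines) "/" = -1 := by
      rw [hfind, hjl, PySem.Chars.find_eq_neg_one_iff]
      intro hinf; exact h ((List.singleton_infix_iff _ _).mp hinf)
    rw [if_neg (by rw [hf]; simp)]
    rw [pvSplit₀_str, hjl]
    have hcoll : pvCollectC (lines.map String.toList) = lines.map String.toList :=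
      pvNoSlash_collect _ (fun p hp hmp => h ((pvMem_join _).mpr ⟨p, hp, hmp⟩))
    rw [hcoll, pvSplit₀_join (by decide)]
    simp [List.map_flatten, List.map_map, Function.comp_def]

-- ===== VERDICT (by name: the statement is the Claim_ definition above) =====
theorem tokenize_keyword_block_py_spec : Claim_equal_tokenize_keyword_block_py := by
  intro lines _
  unfold Spec_tokenize_keyword_block_py tokenize_keyword_block_py
  rw [pvMain lines [], pvBmain]
  simp
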